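-- pv_equiv track=rewrite | github.com/pypi-data/pypi-mirror-402 | packages/benchbox/benchbox-0.1.0-py3-none-any.whl/benchbox/release/workflow.py | _transform_gitignore
-- ===== SOURCE A (Python) =====
-- from collections.abc import Iterable, Sequence
--
-- GITIGNORE_PRIVATE_SECTIONS: Sequence[str] = (
--     # _project/ directory exclusions with marketing doc exceptions
--     "# Exclude everything in _project/",
--     # _binaries/ complex include patterns (public has files directly)
--     "# Include pre-compiled TPC binaries",
--     # _sources/ include patterns
--     "# Include TPC compilation infrastructure",
--     # _sources/ build artifacts and specific excludes
--     "# TPC source build artifacts",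
--     # TODO system _project/ includes
--     "# TODO system infrastructure",
--     # Firebolt-specific data directories
--     "# Firebolt data",
-- )
--
-- GITIGNORE_PRIVATE_LINES: Sequence[str] = (
--     "_sources/join-order-benchmark/",  # Private benchmark data
--     ".mcp.json",  # Private MCP configuration
-- )
--
-- def _transform_gitignore(content: str, direction: str) -> str:
--     """Transform .gitignore content for sync.
--
--     For push (private→public): Removes private-only sections and lines.
--     For pull (public→private): Returns content unchanged (private patterns
--     should be manually maintained in private repo).
--
--     Args:
--         content: .gitignore file content
--         direction: "push" or "pull"
--
--     Returns:
--         Transformed content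
--     """
--     if direction == "pull":
--         # Don't modify gitignore on pull - private patterns are manually maintained
--         return content
--
--     # Push direction: remove private-only sections
--     lines = content.split("\n")
--     result_lines: list[str] = []
--     skip_until_next_section = False
--
--     for line in lines:
--         stripped = line.strip()
--
--         # Check if this line starts a section to skip
--         for section_header in GITIGNORE_PRIVATE_SECTIONS:
--             if stripped.startswith(section_header):
--                 skip_until_next_section = True
--                 break
--
--         # Check if we've hit a new section (comment starting with #)
--         # A new section header must: have text after #, not be a private section marker
--         is_new_section = (
--             skip_until_next_section
--             and stripped.startswith("#")
--             and len(stripped) > 1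
--             and stripped[1:].strip()
--             and not any(stripped.startswith(s) for s in GITIGNORE_PRIVATE_SECTIONS)
--         )
--         if is_new_section:
--             skip_until_next_section = False
--
--         if skip_until_next_section:
--             continue
--
--         # Check if this is an individual line to remove
--         if stripped in GITIGNORE_PRIVATE_LINES:
--             continue
--
--         result_lines.append(line)
--
--     # Clean up multiple consecutive blank lines
--     cleaned_lines: list[str] = []
--     prev_blank = False
--     for line in result_lines:
--         is_blank = not line.strip()
--         if is_blank and prev_blank:
--             continue
--         cleaned_lines.append(line)
--         prev_blank = is_blank
--
--     # Remove trailing blank lines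
--     while cleaned_lines and not cleaned_lines[-1].strip():
--         cleaned_lines.pop()
--
--     return "\n".join(cleaned_lines) + "\n"
-- ===== SOURCE B (Python) =====
-- from collections.abc import Sequence
--
-- GITIGNORE_PRIVATE_SECTIONS: Sequence[str] = (
--     "# Exclude everything in _project/",
--     "# Include pre-compiled TPC binaries",
--     "# Include TPC compilation infrastructure",
--     "# TPC source build artifacts",
--     "# TODO system infrastructure",
--     "# Firebolt data",
-- )
--
-- GITIGNORE_PRIVATE_LINES: Sequence[str] = (
--     "_sources/join-order-benchmark/",
--     ".mcp.json",
-- )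
--
--
-- def _transform_gitignore(content: str, direction: str) -> str:
--     if direction == "pull":
--         return content
--
--     # Group the lines into sections: a section starts at a content comment
--     # (stripped line starting with '#' with non-whitespace after the '#');
--     # the lines before the first header form an implicit kept section.
--     sections: list[tuple[bool, list[str]]] = []
--     cur: list[str] = []
--     cur_private = False
--     for line in content.split("\n"):
--         stripped = line.strip()
--         if stripped.startswith("#") and stripped[1:].strip():
--             sections.append((cur_private, cur))
--             cur = [line]
--             cur_private = any(stripped.startswith(h) for h in GITIGNORE_PRIVATE_SECTIONS)
--         else:
--             cur.append(line)
--     sections.append((cur_private, cur))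
--
--     # Keep non-private sections, dropping private individual lines.
--     kept: list[str] = []
--     for private, sec in sections:
--         if not private:
--             kept.extend(l for l in sec if l.strip() not in GITIGNORE_PRIVATE_LINES)
--
--     # Collapse runs of blank lines (keep a blank only after a non-blank).
--     out: list[str] = []
--     for line in kept:
--         if line.strip() or not out or out[-1].strip():
--             out.append(line)
--
--     # Drop trailing blank lines.
--     while out and not out[-1].strip():
--         out.pop()
--
--     return "\n".join(out) + "\n"
-- ===== Notes on version B (the rewrite author's own statement) =====
-- stated objective: alternative
-- what changed: B splits the content into materialized (is_private, lines) sections grouped at content-comment headers and concatenates the filtered non-private sections, replacing A's one-pass skip-until-next-section flag scan; B's blank-line collapse keys on the last emitted line instead of A's prev_blank flag.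
import Mathlib
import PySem

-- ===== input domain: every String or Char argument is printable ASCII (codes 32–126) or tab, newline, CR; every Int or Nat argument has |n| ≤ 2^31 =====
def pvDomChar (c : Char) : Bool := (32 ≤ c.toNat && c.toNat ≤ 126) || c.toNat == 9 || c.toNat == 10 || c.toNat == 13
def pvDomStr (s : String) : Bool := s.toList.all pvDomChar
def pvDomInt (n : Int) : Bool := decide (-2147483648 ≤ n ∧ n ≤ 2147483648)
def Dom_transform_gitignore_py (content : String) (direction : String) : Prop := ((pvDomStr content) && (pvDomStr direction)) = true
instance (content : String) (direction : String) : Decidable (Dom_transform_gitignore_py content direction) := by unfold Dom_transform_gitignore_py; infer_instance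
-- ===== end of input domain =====

-- B regroups the gitignore into materialized (header, lines) sections and filters whole
-- sections, instead of A's one-pass skip-flag scan; same return value (objective: alternative
-- decomposition, no speed claim).

-- Shared module constants (GITIGNORE_PRIVATE_SECTIONS / GITIGNORE_PRIVATE_LINES) and the
-- literal while-pop trailing-blank trim, which both Pythons contain verbatim.
def pvPrivSections : List String :=
  ["# Exclude everything in _project/",
   "# Include pre-compiled TPC binaries",
   "# Include TPC compilation infrastructure",
   "# TPC source build artifacts",
   "# TODO system infrastructure",
   "# Firebolt data"]

def pvPrivLines : List String :=
  ["_sources/join-order-benchmark/", ".mcp.json"]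

-- content.split("\n")
def pvSplitNL (s : String) : List String :=
  (PySem.Chars.splitOn s.toList ['\n']).map String.ofList

-- any(stripped.startswith(h) for h in GITIGNORE_PRIVATE_SECTIONS)  (A's for/break loop)
def pvIsPriv (stripped : String) : Bool :=
  pvPrivSections.any (fun h => PySem.Str.startswith stripped h)

-- while lines and not lines[-1].strip(): lines.pop()   (identical loop in A and B)
def pvTrimTrail (l : List String) : List String :=
  if h : l = [] then []
  else if PySem.Str.strip (l.getLast h) == "" then pvTrimTrail l.dropLast else l
termination_by l.length
decreasing_by
  simp only [List.length_dropLast]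
  have : l.length ≠ 0 := fun h0 => h (List.eq_nil_of_length_eq_zero h0)
  omega

-- ===== PORT A =====
-- A's main loop: state = (result_lines, skip_until_next_section)
def pvStepA (st : List String × Bool) (line : String) : List String × Bool :=
  let stripped := PySem.Str.strip line
  let skip1 := if pvIsPriv stripped then true else st.2
  let isNew := skip1 && PySem.Str.startswith stripped "#"
      && decide (1 < PySem.Str.len stripped)
      && !(PySem.Str.strip (PySem.Str.slice stripped (some 1) none) == "")
      && !(pvIsPriv stripped)
  let skip2 := if isNew then false else skip1
  if skip2 then (st.1, skip2)
  else if pvPrivLines.contains stripped then (st.1, skip2)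
  else (st.1 ++ [line], skip2)

-- A's blank-collapse loop: state = (cleaned_lines, prev_blank)
def pvCleanStepA (st : List String × Bool) (line : String) : List String × Bool :=
  let isBlank := PySem.Str.strip line == ""
  if isBlank && st.2 then st else (st.1 ++ [line], isBlank)

def transform_gitignore_py (content : String) (direction : String) : String :=
  if direction == "pull" then content
  else
    let resultLines := ((pvSplitNL content).foldl pvStepA ([], false)).1
    let cleaned := (resultLines.foldl pvCleanStepA ([], false)).1
    PySem.Str.join "\n" (pvTrimTrail cleaned) ++ "\n"

-- ===== PORT B =====
-- stripped.startswith("#") and stripped[1:].strip()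
def pvIsHdr (stripped : String) : Bool :=
  PySem.Str.startswith stripped "#"
    && !(PySem.Str.strip (PySem.Str.slice stripped (some 1) none) == "")

-- B's grouping loop: state = (sections, cur, cur_private)
def pvStepB (st : List (Bool × List String) × List String × Bool) (line : String) :
    List (Bool × List String) × List String × Bool :=
  let stripped := PySem.Str.strip line
  if pvIsHdr stripped then (st.1 ++ [(st.2.2, st.2.1)], [line], pvIsPriv stripped)
  else (st.1, st.2.1 ++ [line], st.2.2)

-- l.strip() not in GITIGNORE_PRIVATE_LINES
def pvKeepLine (l : String) : Bool := !(pvPrivLines.contains (PySem.Str.strip l))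

-- B's section filter loop
def pvKeptStep (acc : List String) (s : Bool × List String) : List String :=
  if s.1 then acc else acc ++ s.2.filter pvKeepLine

-- B's blank collapse: keep blank only when out is empty or last kept line is non-blank
def pvCollapseStep (out : List String) (line : String) : List String :=
  if !(PySem.Str.strip line == "") || out.isEmpty
      || !(PySem.Str.strip (out.getLast?.getD "") == "")
  then out ++ [line] else out

def transform_gitignore_py_alt (content : String) (direction : String) : String :=
  if direction == "pull" then content
  else
    let fin := (pvSplitNL content).foldl pvStepB ([], [], false)
    let sections := fin.1 ++ [(fin.2.2, fin.2.1)]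
    let kept := sections.foldl pvKeptStep []
    let out := kept.foldl pvCollapseStep []
    PySem.Str.join "\n" (pvTrimTrail out) ++ "\n"

-- ===== PRECONDITION & SPEC =====
def Spec_transform_gitignore_py (content : String) (direction : String) (out : String) : Prop := out = transform_gitignore_py_alt content direction
instance (content : String) (direction : String) (out : String) : Decidable (Spec_transform_gitignore_py content direction out) := by unfold Spec_transform_gitignore_py; infer_instance

-- ===== CLAIM (what is proved, stated in full; the proofs are below) =====
def Claim_equal_transform_gitignore_py : Prop := ∀ (content : String) (direction : String), Dom_transform_gitignore_py content direction → Spec_transform_gitignore_py content direction (transform_gitignore_py content direction)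

-- ===== LEMMAS AND PROOFS =====

-- Reference recursion: the lines surviving the section/line filter, given the
-- current skip/private flag.
def pvRest : List String → Bool → List String
  | [], _ => []
  | l :: ls, priv =>
    let priv' := if pvIsHdr (PySem.Str.strip l) then pvIsPriv (PySem.Str.strip l) else priv
    (if priv' || pvPrivLines.contains (PySem.Str.strip l) then [] else [l]) ++ pvRest ls priv'

-- a non-space character in cs keeps strip cs non-empty
theorem pv_strip_ne_nil (cs : List Char) (c : Char) (hc : c ∈ cs)
    (hs : PySem.Chars.isspace c = false) : PySem.Chars.strip cs ≠ [] := by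
  intro h
  have h1 : List.dropWhile PySem.Chars.isspace
      (List.dropWhile PySem.Chars.isspace cs).reverse = [] := by
    simpa [PySem.Chars.strip, PySem.Chars.rstrip, PySem.Chars.lstrip] using h
  have h2 : ∀ x ∈ (List.dropWhile PySem.Chars.isspace cs).reverse,
      PySem.Chars.isspace x = true := List.dropWhile_eq_nil_iff.mp h1
  have h3 : ∀ x ∈ cs, PySem.Chars.isspace x = true := by
    intro x hx
    rw [← List.takeWhile_append_dropWhile (p := PySem.Chars.isspace) (l := cs)] at hx
    rcases List.mem_append.mp hx with h' | h'
    · exact List.mem_takeWhile_imp h'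
    · exact h2 x (List.mem_reverse.mpr h')
  rw [h3 c hc] at hs; simp at hs

-- every private section header is itself a content comment
theorem pv_priv_hdr (s : String) (h : pvIsPriv s = true) : pvIsHdr s = true := by
  rcases List.any_eq_true.mp h with ⟨hd, hmem, hsw⟩
  have hpre : hd.toList <+: s.toList := (PySem.Chars.startswith_iff _ _).mp hsw
  obtain ⟨t, ht⟩ := hpre
  have hhd : hd.toList.length ≥ 2 ∧ hd.toList.head? = some '#' ∧
      ((hd.toList.drop 1).any (fun c => !PySem.Chars.isspace c)) = true := by
    simp only [pvPrivSections, List.mem_cons, List.not_mem_nil, or_false] at hmem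
    rcases hmem with rfl | rfl | rfl | rfl | rfl | rfl <;> exact ⟨by decide, by rfl, by decide⟩
  obtain ⟨hlen, hhead, hany⟩ := hhd
  rcases List.any_eq_true.mp hany with ⟨c, hcmem, hcb⟩
  have hcsp : PySem.Chars.isspace c = false := by simpa using hcb
  have hsw2 : PySem.Str.startswith s "#" = true := by
    unfold PySem.Str.startswith
    apply (PySem.Chars.startswith_iff _ _).mpr
    have h1 : ("#" : String).toList = ['#'] := rfl
    rw [h1, ← ht]
    cases hl : hd.toList with
    | nil => rw [hl] at hlen; simp at hlen
    | cons a as =>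
      rw [hl] at hhead
      simp only [List.head?_cons, Option.some.injEq] at hhead
      exact ⟨as ++ t, by simp [hhead]⟩
  have htail : (PySem.Str.strip (PySem.Str.slice s (some 1) none) == "") = false := by
    rw [Bool.eq_false_iff]
    intro hbeq
    have heq : PySem.Str.strip (PySem.Str.slice s (some 1) none) = "" := beq_iff_eq.mp hbeq
    have hlist : PySem.Chars.strip (PySem.Chars.slice s.toList (some 1) none) = [] := by
      have := congrArg String.toList heq
      rwa [PySem.Str.toList_strip, PySem.Str.toList_slice] at this
    have hdrop : PySem.Chars.slice s.toList (some 1) none = s.toList.drop 1 := by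
      rw [PySem.Chars.slice_eq_listSlice]
      exact PySem.List.slice_from s.toList (by norm_num)
    rw [hdrop] at hlist
    have hcmem2 : c ∈ s.toList.drop 1 := by
      rw [← ht, List.drop_append_of_le_length (by omega)]
      exact List.mem_append.mpr (Or.inl hcmem)
    exact pv_strip_ne_nil _ c hcmem2 hcsp hlist
  unfold pvIsHdr
  rw [hsw2, htail]
  rfl

-- a content comment has length > 1
theorem pv_hdr_len (s : String) (h : pvIsHdr s = true) :
    decide (1 < PySem.Str.len s) = true := by
  unfold pvIsHdr at h
  have htail := (Bool.and_eq_true_iff.mp h).2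
  have hdrop : s.toList.drop 1 ≠ [] := by
    intro hnil
    have hz : PySem.Str.strip (PySem.Str.slice s (some 1) none) = "" := by
      have hlist : (PySem.Str.strip (PySem.Str.slice s (some 1) none)).toList = [] := by
        rw [PySem.Str.toList_strip, PySem.Str.toList_slice, PySem.Chars.slice_eq_listSlice,
          PySem.List.slice_from s.toList (by norm_num)]
        rw [show (1 : Int).toNat = 1 from rfl, hnil]
        decide
      have := congrArg String.ofList hlist
      rwa [String.ofList_toList] at this
    rw [hz] at htail; simp at htail
  have h2 : 1 < s.toList.length := by
    rcases Nat.lt_or_ge 1 s.toList.length with h' | h'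
    · exact h'
    · exact absurd (List.drop_eq_nil_of_le h') hdrop
  simp only [PySem.Str.len, decide_eq_true_eq]
  exact_mod_cast h2

-- A's step, characterized by the header/private classification of the stripped line
theorem pvStepA_char (st : List String × Bool) (l : String) :
    pvStepA st l =
      ((if (if pvIsHdr (PySem.Str.strip l) then pvIsPriv (PySem.Str.strip l) else st.2)
            || pvPrivLines.contains (PySem.Str.strip l)
        then st.1 else st.1 ++ [l]),
       (if pvIsHdr (PySem.Str.strip l) then pvIsPriv (PySem.Str.strip l) else st.2)) := by
  simp only [pvStepA]
  by_cases hh : pvIsHdr (PySem.Str.strip l) = true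
  · have hsw := (Bool.and_eq_true_iff.mp hh).1
    have htail := (Bool.and_eq_true_iff.mp hh).2
    have hlen := pv_hdr_len _ hh
    rw [hsw, htail, hlen, if_pos hh]
    by_cases hp : pvIsPriv (PySem.Str.strip l) = true
    · rw [hp]
      by_cases hk : pvPrivLines.contains (PySem.Str.strip l) = true <;> simp [hk]
    · have hp' : pvIsPriv (PySem.Str.strip l) = false := Bool.eq_false_iff.mpr hp
      rw [hp']
      by_cases hk : pvPrivLines.contains (PySem.Str.strip l) = true <;>
        cases hst : st.2 <;> simp [hk, hst] <;> (split <;> rfl)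
  · have hh' : pvIsHdr (PySem.Str.strip l) = false := Bool.eq_false_iff.mpr hh
    have hp' : pvIsPriv (PySem.Str.strip l) = false := by
      rw [Bool.eq_false_iff]; exact fun hp => hh (pv_priv_hdr _ hp)
    unfold pvIsHdr at hh'
    rw [hp', if_neg hh]
    rcases Bool.and_eq_false_iff.mp hh' with h1 | h1 <;>
      rw [h1] <;>
      (by_cases hk : pvPrivLines.contains (PySem.Str.strip l) = true <;>
        cases hst : st.2 <;> simp [hk, hst] <;> (split <;> rfl))

-- A's filter loop computes pvRest
theorem pvA_filter (ls : List String) : ∀ (acc : List String) (skip : Bool),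
    (ls.foldl pvStepA (acc, skip)).1 = acc ++ pvRest ls skip := by
  induction ls with
  | nil => intro acc skip; simp [pvRest]
  | cons l ls ih =>
    intro acc skip
    simp only [List.foldl_cons, pvStepA_char, pvRest]
    rw [ih]
    cases h : ((if pvIsHdr (PySem.Str.strip l) then pvIsPriv (PySem.Str.strip l) else skip)
        || pvPrivLines.contains (PySem.Str.strip l)) <;> simp [h]

-- B's section-filter fold distributes over its accumulator
theorem pvKept_acc (secs : List (Bool × List String)) : ∀ acc : List String,
    secs.foldl pvKeptStep acc = acc ++ secs.foldl pvKeptStep [] := by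
  induction secs with
  | nil => intro acc; simp
  | cons s secs ih =>
    intro acc
    simp only [List.foldl_cons]
    rw [ih (pvKeptStep acc s), ih (pvKeptStep [] s)]
    unfold pvKeptStep
    split <;> simp

-- B's grouping + section filter computes pvRest
theorem pvB_filter (ls : List String) :
    ∀ (secs : List (Bool × List String)) (cur : List String) (priv : Bool),
    (((ls.foldl pvStepB (secs, cur, priv)).1
        ++ [((ls.foldl pvStepB (secs, cur, priv)).2.2,
             (ls.foldl pvStepB (secs, cur, priv)).2.1)]).foldl pvKeptStep [])
      = (secs.foldl pvKeptStep [])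
        ++ (if priv then [] else cur.filter pvKeepLine)
        ++ pvRest ls priv := by
  induction ls with
  | nil =>
    intro secs cur priv
    simp only [List.foldl_nil, pvRest]
    rw [List.foldl_append]
    simp only [List.foldl_cons, List.foldl_nil]
    rw [pvKept_acc]
    unfold pvKeptStep
    cases priv <;> simp
  | cons l ls ih =>
    intro secs cur priv
    simp only [List.foldl_cons, pvRest]
    by_cases hh : pvIsHdr (PySem.Str.strip l) = true
    · have hstep : pvStepB (secs, cur, priv) l
          = (secs ++ [(priv, cur)], [l], pvIsPriv (PySem.Str.strip l)) := by
        simp [pvStepB, hh]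
      rw [hstep, ih]
      rw [List.foldl_append]
      simp only [List.foldl_cons, List.foldl_nil]
      rw [pvKept_acc]
      simp only [hh, if_pos]
      unfold pvKeptStep
      cases hp : pvIsPriv (PySem.Str.strip l) <;>
        cases priv <;>
        by_cases hk : PySem.Str.strip l ∈ pvPrivLines <;>
        simp [hp, hk, pvKeepLine, List.filter_cons, List.append_assoc]
    · have hh' : pvIsHdr (PySem.Str.strip l) = false := Bool.eq_false_iff.mpr hh
      have hstep : pvStepB (secs, cur, priv) l = (secs, cur ++ [l], priv) := by
        simp [pvStepB, hh']
      rw [hstep, ih]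
      simp only [hh', Bool.false_eq_true, if_false]
      cases priv <;>
        by_cases hk : PySem.Str.strip l ∈ pvPrivLines <;>
        simp [hk, pvKeepLine, List.filter_append, List.filter_cons, List.append_assoc]

-- A's prev_blank flag equals "accumulator non-empty and ends blank"; under that
-- invariant A's collapse loop equals B's
theorem pv_collapse (ls : List String) : ∀ (acc : List String) (prev : Bool),
    prev = (!acc.isEmpty && (PySem.Str.strip (acc.getLast?.getD "") == "")) →
    (ls.foldl pvCleanStepA (acc, prev)).1 = ls.foldl pvCollapseStep acc := by
  induction ls with
  | nil => intro acc prev _; simp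
  | cons l ls ih =>
    intro acc prev hinv
    subst hinv
    simp only [List.foldl_cons]
    by_cases hb : (PySem.Str.strip l == "") = true
    · by_cases hp : (!acc.isEmpty && (PySem.Str.strip (acc.getLast?.getD "") == "")) = true
      · have hA : pvCleanStepA (acc, !acc.isEmpty && (PySem.Str.strip (acc.getLast?.getD "") == "")) l
            = (acc, !acc.isEmpty && (PySem.Str.strip (acc.getLast?.getD "") == "")) := by
          simp [pvCleanStepA, hb, hp]
        have hB : pvCollapseStep acc l = acc := by
          have h1 := (Bool.and_eq_true_iff.mp hp).1
          have h2 := (Bool.and_eq_true_iff.mp hp).2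
          simp [pvCollapseStep, hb, h2, show acc.isEmpty = false by simpa using h1]
        rw [hA, hB]
        exact ih acc _ rfl
      · have hp' : (!acc.isEmpty && (PySem.Str.strip (acc.getLast?.getD "") == "")) = false :=
          Bool.eq_false_iff.mpr hp
        have hA : pvCleanStepA (acc, !acc.isEmpty && (PySem.Str.strip (acc.getLast?.getD "") == "")) l
            = (acc ++ [l], true) := by
          simp [pvCleanStepA, hb, hp']
        have hB : pvCollapseStep acc l = acc ++ [l] := by
          rcases Bool.and_eq_false_iff.mp hp' with h1 | h1
          · simp [pvCollapseStep, show acc.isEmpty = true by simpa using h1]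
          · simp [pvCollapseStep, h1]
        rw [hA, hB]
        apply ih
        simp [List.getLast?_concat, hb]
    · have hb' : (PySem.Str.strip l == "") = false := Bool.eq_false_iff.mpr hb
      have hA : pvCleanStepA (acc, !acc.isEmpty && (PySem.Str.strip (acc.getLast?.getD "") == "")) l
          = (acc ++ [l], false) := by
        simp [pvCleanStepA, hb']
      have hB : pvCollapseStep acc l = acc ++ [l] := by
        simp [pvCollapseStep, hb']
      rw [hA, hB]
      apply ih
      simp [List.getLast?_concat, hb']

-- ===== VERDICT (by name: the statement is the Claim_ definition above) =====
theorem transform_gitignore_py_spec : Claim_equal_transform_gitignore_py := by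
  intro content direction _
  unfold Spec_transform_gitignore_py transform_gitignore_py transform_gitignore_py_alt
  by_cases hd : (direction == "pull") = true
  · simp [hd]
  · simp only [Bool.eq_false_iff.mpr hd]
    have hfilt : ((pvSplitNL content).foldl pvStepA ([], false)).1
        = pvRest (pvSplitNL content) false := by
      simpa using pvA_filter (pvSplitNL content) [] false
    have hkept : (((pvSplitNL content).foldl pvStepB ([], [], false)).1
        ++ [(((pvSplitNL content).foldl pvStepB ([], [], false)).2.2,
             ((pvSplitNL content).foldl pvStepB ([], [], false)).2.1)]).foldl pvKeptStep []
        = pvRest (pvSplitNL content) false := by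
      simpa using pvB_filter (pvSplitNL content) [] [] false
    rw [hfilt, hkept]
    rw [pv_collapse (pvRest (pvSplitNL content) false) [] false (by simp)]
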